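-- pv_equiv track=rewrite | github.com/xianyuanliu/vlm_post-ocr_correction | combine_sequence_cer_wer.py | combine_by_sample
-- ===== SOURCE A (Python) =====
-- def normalize(text: str) -> str:
--     return " ".join(text.split())
--
-- def combine_by_sample(
--     rows: list[dict[str, str]]
-- ) -> tuple[list[str], dict[str, dict[str, list[str]]]]:
--     combined: dict[str, dict[str, list[str]]] = {}
--     order: list[str] = []
--
--     for row in rows:
--         sample = (row.get("Sample") or "").strip()
--         if not sample:
--             continue
--
--         if sample not in combined:
--             combined[sample] = {"ocr": [], "gt": [], "post": []}
--             order.append(sample)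
--
--         combined[sample]["ocr"].append(normalize(row.get("OCR Text", "")))
--         combined[sample]["gt"].append(normalize(row.get("Ground Truth", "")))
--         combined[sample]["post"].append(normalize(row.get("Model Correction", "")))
--
--     return order, combined
-- ===== SOURCE B (Python) =====
-- def normalize(text: str) -> str:
--     return " ".join(text.split())
--
-- def combine_by_sample(
--     rows: list[dict[str, str]]
-- ) -> tuple[list[str], dict[str, dict[str, list[str]]]]:
--     # Pass 1: pair every row with its stripped sample key.
--     keyed = [((row.get("Sample") or "").strip(), row) for row in rows]
--     # First-appearance order of the non-empty keys.
--     order = list(dict.fromkeys(s for s, _ in keyed if s))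
--     # Pass 2: shape the output per sample via comprehensions.
--     combined = {
--         s: {
--             "ocr": [normalize(r.get("OCR Text", "")) for k, r in keyed if k == s],
--             "gt": [normalize(r.get("Ground Truth", "")) for k, r in keyed if k == s],
--             "post": [normalize(r.get("Model Correction", "")) for k, r in keyed if k == s],
--         }
--         for s in order
--     }
--     return order, combined
-- ===== Notes on version B (the rewrite author's own statement) =====
-- stated objective: alternative
-- what changed: A builds three normalized lists incrementally inside one loop over a nested dict-of-dicts; B instead keys every row once, derives the first-appearance order with dict.fromkeys over the key sequence, and then shapes the whole output in a second pass with per-sample filtering comprehensions.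
import Mathlib
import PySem

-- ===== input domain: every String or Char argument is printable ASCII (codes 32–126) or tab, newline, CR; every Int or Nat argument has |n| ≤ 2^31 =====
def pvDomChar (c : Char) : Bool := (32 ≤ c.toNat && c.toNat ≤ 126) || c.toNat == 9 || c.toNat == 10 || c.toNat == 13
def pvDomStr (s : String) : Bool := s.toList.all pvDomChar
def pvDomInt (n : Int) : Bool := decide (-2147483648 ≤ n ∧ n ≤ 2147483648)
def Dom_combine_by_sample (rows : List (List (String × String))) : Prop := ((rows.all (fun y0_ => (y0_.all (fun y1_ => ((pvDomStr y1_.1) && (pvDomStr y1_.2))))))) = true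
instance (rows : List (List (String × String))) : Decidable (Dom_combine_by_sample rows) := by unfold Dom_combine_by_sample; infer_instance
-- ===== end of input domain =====

-- B regroups the work into two shaped passes (key every row once, dedup the key sequence for the
-- order, then build each sample's three lists by filtering comprehensions) instead of A's single
-- incremental loop over a nested dict-of-dicts; objective: alternative decomposition, not speed.

-- shared module helper: normalize(text) = " ".join(text.split())
def normalize_py (text : String) : String := PySem.Str.join " " (PySem.Str.split₀ text)

-- ===== PORT A =====
def combine_by_sample (rows : List (List (String × String))) :
    List String × (List (String × List (String × List String))) :=
  let st := rows.foldl (fun st row =>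
    let d := PySem.Dict.mk row
    -- (row.get("Sample") or "").strip(): a missing key yields None→"" and "" or "" = "", so getD "" then strip
    let sample := PySem.Str.strip (d.getD "Sample" "")
    if sample = "" then st
    else
      let st1 := if st.1.contains sample then st
        else (st.1.insert sample (PySem.Dict.mk [("ocr", []), ("gt", []), ("post", [])]),
              st.2 ++ [sample])
      -- combined[sample]["ocr"].append(…) etc.: in-place mutation of the inner dict's lists
      let inner := st1.1.getD sample (PySem.Dict.mk [])
      let inner := inner.modify "ocr" [] (· ++ [normalize_py (d.getD "OCR Text" "")])
      let inner := inner.modify "gt" [] (· ++ [normalize_py (d.getD "Ground Truth" "")])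
      let inner := inner.modify "post" [] (· ++ [normalize_py (d.getD "Model Correction" "")])
      (st1.1.insert sample inner, st1.2))
    ((PySem.Dict.empty : PySem.Dict String (PySem.Dict String (List String))), ([] : List String))
  (st.2, st.1.items.map (fun p => (p.1, p.2.items)))

-- ===== PORT B =====
def combine_by_sample_alt (rows : List (List (String × String))) :
    List String × (List (String × List (String × List String))) :=
  let keyed := rows.map (fun row =>
    (PySem.Str.strip ((PySem.Dict.mk row).getD "Sample" ""), row))
  let order := PySem.List.dedup ((keyed.filter (fun p => !(p.1 == ""))).map Prod.fst)
  let combined := order.map (fun s =>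
    (s, [("ocr", (keyed.filter (fun p => p.1 == s)).map
            (fun p => normalize_py ((PySem.Dict.mk p.2).getD "OCR Text" ""))),
         ("gt", (keyed.filter (fun p => p.1 == s)).map
            (fun p => normalize_py ((PySem.Dict.mk p.2).getD "Ground Truth" ""))),
         ("post", (keyed.filter (fun p => p.1 == s)).map
            (fun p => normalize_py ((PySem.Dict.mk p.2).getD "Model Correction" "")))]))
  (order, combined)

-- ===== PRECONDITION & SPEC =====
def Spec_combine_by_sample (rows : List (List (String × String))) (out : List String × (List (String × List (String × List String)))) : Prop := out = combine_by_sample_alt rows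
instance (rows : List (List (String × String))) (out : List String × (List (String × List (String × List String)))) : Decidable (Spec_combine_by_sample rows out) := by unfold Spec_combine_by_sample; infer_instance

-- ===== CLAIM (what is proved, stated in full; the proofs are below) =====
def Claim_equal_combine_by_sample : Prop := ∀ (rows : List (List (String × String))), Dom_combine_by_sample rows → Spec_combine_by_sample rows (combine_by_sample rows)

-- ===== LEMMAS AND PROOFS =====

-- proof-side names for the quantities both ports compute
def keyOf (row : List (String × String)) : String :=
  PySem.Str.strip ((PySem.Dict.mk row).getD "Sample" "")

def fieldList (fld s : String) (xs : List (List (String × String))) : List String :=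
  (xs.filter (fun r => keyOf r == s)).map
    (fun r => normalize_py ((PySem.Dict.mk r).getD fld ""))

def ordOf (xs : List (List (String × String))) : List String :=
  PySem.List.dedup ((xs.filter (fun r => !(keyOf r == ""))).map keyOf)

def innerOf (s : String) (xs : List (List (String × String))) :
    PySem.Dict String (List String) :=
  PySem.Dict.mk [("ocr", fieldList "OCR Text" s xs),
                 ("gt", fieldList "Ground Truth" s xs),
                 ("post", fieldList "Model Correction" s xs)]

def combOf (xs : List (List (String × String))) :
    PySem.Dict String (PySem.Dict String (List String)) :=
  PySem.Dict.mk ((ordOf xs).map (fun s => (s, innerOf s xs)))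

-- the loop body of A's port, named so the fold can be reasoned about
def stepA (st : PySem.Dict String (PySem.Dict String (List String)) × List String)
    (row : List (String × String)) :
    PySem.Dict String (PySem.Dict String (List String)) × List String :=
  let d := PySem.Dict.mk row
  let sample := PySem.Str.strip (d.getD "Sample" "")
  if sample = "" then st
  else
    let st1 := if st.1.contains sample then st
      else (st.1.insert sample (PySem.Dict.mk [("ocr", []), ("gt", []), ("post", [])]),
            st.2 ++ [sample])
    let inner := st1.1.getD sample (PySem.Dict.mk [])
    let inner := inner.modify "ocr" [] (· ++ [normalize_py (d.getD "OCR Text" "")])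
    let inner := inner.modify "gt" [] (· ++ [normalize_py (d.getD "Ground Truth" "")])
    let inner := inner.modify "post" [] (· ++ [normalize_py (d.getD "Model Correction" "")])
    (st1.1.insert sample inner, st1.2)

lemma mem_ordOf (xs : List (List (String × String))) (s : String) :
    s ∈ ordOf xs ↔ s ≠ "" ∧ s ∈ xs.map keyOf := by
  simp only [ordOf, PySem.List.dedup, PySem.Set.mem_ofList, List.mem_map, List.mem_filter]
  constructor
  · rintro ⟨r, ⟨hr, hne⟩, rfl⟩
    exact ⟨by simpa using hne, ⟨r, hr, rfl⟩⟩
  · rintro ⟨hne, r, hr, rfl⟩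
    exact ⟨r, ⟨hr, by simpa using hne⟩, rfl⟩

lemma nodup_ordOf (xs : List (List (String × String))) : (ordOf xs).Nodup := by
  exact PySem.List.nodup_dedup _

lemma ordOf_append_singleton (xs : List (List (String × String))) (row : List (String × String)) :
    ordOf (xs ++ [row]) =
      if keyOf row = "" ∨ keyOf row ∈ ordOf xs then ordOf xs else ordOf xs ++ [keyOf row] := by
  by_cases hk : keyOf row = ""
  · simp [ordOf, List.filter_append, hk]
  · have h1 : ordOf (xs ++ [row]) = PySem.Set.ofList
        (((xs.filter (fun r => !(keyOf r == ""))).map keyOf) ++ [keyOf row]) := by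
      simp [ordOf, PySem.List.dedup, List.filter_append, hk]
    have h2 : PySem.Set.ofList ((xs.filter (fun r => !(keyOf r == ""))).map keyOf) = ordOf xs := rfl
    rw [h1, PySem.Set.ofList_eq_foldl, List.foldl_append, List.foldl_cons, List.foldl_nil,
        ← PySem.Set.ofList_eq_foldl, h2]
    simp only [PySem.Set.add, PySem.Set.contains]
    by_cases hm : keyOf row ∈ ordOf xs <;> simp [hm, hk]

lemma fieldList_append_singleton (fld s : String) (xs : List (List (String × String)))
    (row : List (String × String)) :
    fieldList fld s (xs ++ [row]) =
      fieldList fld s xs ++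
        (if keyOf row = s then [normalize_py ((PySem.Dict.mk row).getD fld "")] else []) := by
  simp only [fieldList, List.filter_append]
  split_ifs with h <;> simp [h]

lemma innerOf_append_of_ne (s : String) (xs : List (List (String × String)))
    (row : List (String × String)) (h : keyOf row ≠ s) :
    innerOf s (xs ++ [row]) = innerOf s xs := by
  simp [innerOf, fieldList_append_singleton, h]

lemma innerOf_append_self (xs : List (List (String × String))) (row : List (String × String)) :
    innerOf (keyOf row) (xs ++ [row]) =
      PySem.Dict.mk
        [("ocr", fieldList "OCR Text" (keyOf row) xs ++ [normalize_py ((PySem.Dict.mk row).getD "OCR Text" "")]),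
         ("gt", fieldList "Ground Truth" (keyOf row) xs ++ [normalize_py ((PySem.Dict.mk row).getD "Ground Truth" "")]),
         ("post", fieldList "Model Correction" (keyOf row) xs ++ [normalize_py ((PySem.Dict.mk row).getD "Model Correction" "")])] := by
  simp [innerOf, fieldList_append_singleton]

lemma keys_combOf (xs : List (List (String × String))) :
    (combOf xs).keys = ordOf xs := by
  simp [combOf, PySem.Dict.keys, Function.comp_def]

lemma contains_combOf (xs : List (List (String × String))) (s : String) :
    (combOf xs).contains s = decide (s ∈ ordOf xs) := by
  rw [PySem.Dict.contains_eq_decide_mem_keys, keys_combOf]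

lemma getD_combOf (xs : List (List (String × String))) (s : String) (h : s ∈ ordOf xs) :
    (combOf xs).getD s (PySem.Dict.mk []) = innerOf s xs := by
  apply PySem.Dict.getD_of_mem_items
  · simp only [combOf, List.mem_map]
    exact ⟨s, h, rfl⟩
  · rw [keys_combOf]; exact nodup_ordOf xs

-- the three appends on the inner dict, evaluated on its literal shape
lemma inner_modify (a b c : List String) (x y z : String) :
    (((PySem.Dict.mk [("ocr", a), ("gt", b), ("post", c)]).modify "ocr" [] (· ++ [x])).modify
        "gt" [] (· ++ [y])).modify "post" [] (· ++ [z]) =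
      PySem.Dict.mk [("ocr", a ++ [x]), ("gt", b ++ [y]), ("post", c ++ [z])] := by
  simp [PySem.Dict.modify, PySem.Dict.insert, PySem.Dict.getD, PySem.Dict.get?,
        PySem.Dict.contains, List.find?]

lemma map_inner_append (pre : List (List (String × String))) (row : List (String × String))
    (l : List String) (h : keyOf row ∉ l) :
    l.map (fun s => (s, innerOf s (pre ++ [row]))) = l.map (fun s => (s, innerOf s pre)) :=
  List.map_congr_left (fun s hs => by
    rw [innerOf_append_of_ne _ _ _ (fun e => h (e ▸ hs))])

lemma step_lemma (pre : List (List (String × String))) (row : List (String × String)) :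
    stepA (combOf pre, ordOf pre) row = (combOf (pre ++ [row]), ordOf (pre ++ [row])) := by
  by_cases hk : keyOf row = ""
  · have hord : ordOf (pre ++ [row]) = ordOf pre := by
      rw [ordOf_append_singleton]; simp [hk]
    have hnm : keyOf row ∉ ordOf pre := fun h => ((mem_ordOf pre _).1 h).1 hk
    have hcomb : combOf (pre ++ [row]) = combOf pre := by
      simp only [combOf, hord]; rw [map_inner_append pre row _ hnm]
    simp only [stepA]
    rw [show PySem.Str.strip ((PySem.Dict.mk row).getD "Sample" "") = keyOf row from rfl]
    simp [hk, hord, hcomb]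
  · by_cases hm : keyOf row ∈ ordOf pre
    · have hord : ordOf (pre ++ [row]) = ordOf pre := by
        rw [ordOf_append_singleton]; simp [hm]
      have hcont : (combOf pre).contains (keyOf row) = true := by
        simp [contains_combOf, hm]
      simp only [stepA]
      rw [show PySem.Str.strip ((PySem.Dict.mk row).getD "Sample" "") = keyOf row from rfl]
      rw [if_neg hk, if_pos hcont]
      simp only []
      rw [getD_combOf pre _ hm]
      rw [show innerOf (keyOf row) pre = PySem.Dict.mk
            [("ocr", fieldList "OCR Text" (keyOf row) pre),
             ("gt", fieldList "Ground Truth" (keyOf row) pre),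
             ("post", fieldList "Model Correction" (keyOf row) pre)] from rfl]
      rw [inner_modify]
      refine Prod.ext ?_ hord.symm
      apply PySem.Dict.ext
      rw [PySem.Dict.items_insert_of_contains _ _ hcont]
      simp only [combOf, hord, List.map_map]
      apply List.map_congr_left
      intro s hs
      by_cases hsk : s = keyOf row
      · subst hsk
        simp [innerOf_append_self, fieldList]
      · simp only [Function.comp_apply]
        rw [if_neg (by simpa using hsk), innerOf_append_of_ne _ _ _ (fun e => hsk e.symm)]
    · have hord : ordOf (pre ++ [row]) = ordOf pre ++ [keyOf row] := by
        rw [ordOf_append_singleton]; simp [hk, hm]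
      have hcont : (combOf pre).contains (keyOf row) = false := by
        simp [contains_combOf, hm]
      have hfl : ∀ fld, fieldList fld (keyOf row) pre = [] := by
        intro fld
        have : ∀ r ∈ pre, ¬(keyOf r == keyOf row) := by
          intro r hr hb
          exact hm ((mem_ordOf pre _).2 ⟨hk, by
            exact List.mem_map.2 ⟨r, hr, by simpa using hb⟩⟩)
        simp only [fieldList]
        rw [List.filter_eq_nil_iff.2 (by intro r hr; simpa using this r hr)]
        rfl
      simp only [stepA]
      rw [show PySem.Str.strip ((PySem.Dict.mk row).getD "Sample" "") = keyOf row from rfl]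
      rw [if_neg hk, if_neg (by simp [hcont])]
      simp only []
      rw [PySem.Dict.getD_insert_self, inner_modify, PySem.Dict.insert_insert_self]
      refine Prod.ext ?_ hord.symm
      apply PySem.Dict.ext
      rw [PySem.Dict.items_insert_of_not_contains _ _ hcont]
      simp only [combOf, hord, List.map_append, List.map_cons, List.map_nil]
      rw [map_inner_append pre row _ hm]
      congr 1
      simp [innerOf_append_self, hfl]

lemma loopA (rows pre : List (List (String × String))) :
    rows.foldl stepA (combOf pre, ordOf pre) = (combOf (pre ++ rows), ordOf (pre ++ rows)) := by
  induction rows generalizing pre with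
  | nil => simp
  | cons row rest ih =>
      rw [List.foldl_cons, step_lemma pre row, ih (pre ++ [row])]
      simp

-- ===== VERDICT (by name: the statement is the Claim_ definition above) =====
theorem combine_by_sample_spec : Claim_equal_combine_by_sample := by
  intro rows _
  show combine_by_sample rows = combine_by_sample_alt rows
  have h := loopA rows []
  simp only [List.nil_append] at h
  show ((rows.foldl stepA (combOf [], ordOf [])).2,
        (rows.foldl stepA (combOf [], ordOf [])).1.items.map (fun p => (p.1, p.2.items)))
      = combine_by_sample_alt rows
  rw [h]
  simp only [combine_by_sample_alt, combOf, List.map_map, List.filter_map,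
             Function.comp_def, innerOf, fieldList, ordOf, keyOf]
  rfl
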